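-- pv_equiv track=rewrite | github.com/HyeonJinGitHub/LearningRepository | 백준/9095 1, 2, 3 더하기/안현진.py | solution
-- ===== SOURCE A (Python) =====
-- def solution(s, goal):
--     if s > goal:
--         return 0
--     if s == goal:
--         return 1
--     now = 0
--     for i in range(1, 4):
--         now += solution(s + i, goal)
--     return now
-- ===== SOURCE B (Python) =====
-- def solution(s, goal):
--     d = goal - s
--     if d < 0:
--         return 0
--     w0, w1, w2 = 1, 0, 0
--     for _ in range(d):
--         w0, w1, w2 = w0 + w1 + w2, w0, w1
--     return w0
-- ===== Notes on version B (the rewrite author's own statement) =====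
-- stated objective: alternative
-- what changed: Replaced the triple-branch recursion with an iterative tribonacci DP over d = goal - s, keeping only the last three counts.
import Mathlib
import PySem

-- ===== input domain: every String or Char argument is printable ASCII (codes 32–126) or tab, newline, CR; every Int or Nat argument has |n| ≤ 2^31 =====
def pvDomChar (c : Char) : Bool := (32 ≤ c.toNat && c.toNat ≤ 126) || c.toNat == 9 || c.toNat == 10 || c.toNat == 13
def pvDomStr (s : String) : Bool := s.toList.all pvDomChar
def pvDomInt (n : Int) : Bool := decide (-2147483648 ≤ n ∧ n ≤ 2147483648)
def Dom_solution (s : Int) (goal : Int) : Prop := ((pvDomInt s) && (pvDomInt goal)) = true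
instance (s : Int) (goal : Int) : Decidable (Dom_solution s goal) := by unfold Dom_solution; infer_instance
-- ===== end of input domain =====

-- B replaces A's triple-branch recursion by an iterative tribonacci DP over goal - s; return values proved equal on Pre_.

-- ===== PORT A =====
def solution (s : Int) (goal : Int) : Int :=
  if s > goal then 0
  else if s = goal then 1
  else ((0 + solution (s + 1) goal) + solution (s + 2) goal) + solution (s + 3) goal
termination_by (goal - s).toNat
decreasing_by all_goals omega

-- ===== PORT B =====
def solution_alt (s : Int) (goal : Int) : Int :=
  let d := goal - s
  if d < 0 then 0
  else
    ((List.range d.toNat).foldl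
      (fun (w : Int × Int × Int) _ => (w.1 + w.2.1 + w.2.2, w.1, w.2.1)) (1, 0, 0)).1

-- ===== PRECONDITION & SPEC =====
-- Pre_ excludes exactly the inputs with goal - s >= 998, on which Python A raises RecursionError
-- (its recursion depth is goal - s + 1, beyond the default limit of 1000); B returns the count there.
def Pre_solution (s : Int) (goal : Int) : Prop := goal - s < 998
instance (s : Int) (goal : Int) : Decidable (Pre_solution s goal) := by unfold Pre_solution; infer_instance
def pvWitness_solution : Int × Int := (0, 5)


def Spec_solution (s : Int) (goal : Int) (out : Int) : Prop := out = solution_alt s goal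
instance (s : Int) (goal : Int) (out : Int) : Decidable (Spec_solution s goal out) := by unfold Spec_solution; infer_instance

-- ===== CLAIM (what is proved, stated in full; the proofs are below) =====
def Claim_equal_solution : Prop := ∀ (s : Int) (goal : Int), Dom_solution s goal → Pre_solution s goal → Spec_solution s goal (solution s goal)

-- ===== LEMMAS AND PROOFS =====

-- number of compositions of n into parts 1,2,3 (tribonacci)
def pvG : Nat → Int
  | 0 => 1
  | 1 => 1
  | 2 => 2
  | n + 3 => pvG (n + 2) + pvG (n + 1) + pvG n

-- the fold state after n steps
def pvIter : Nat → Int × Int × Int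
  | 0 => (1, 0, 0)
  | n + 1 =>
    let w := pvIter n
    (w.1 + w.2.1 + w.2.2, w.1, w.2.1)

theorem pvFoldl_range (n : Nat) :
    (List.range n).foldl
      (fun (w : Int × Int × Int) _ => (w.1 + w.2.1 + w.2.2, w.1, w.2.1)) (1, 0, 0)
      = pvIter n := by
  induction n with
  | zero => rfl
  | succ n ih => rw [List.range_succ, List.foldl_append, ih]; rfl

theorem pvIter_eq (n : Nat) :
    pvIter n = (pvG n, (if 1 ≤ n then pvG (n - 1) else 0), (if 2 ≤ n then pvG (n - 2) else 0)) := by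
  induction n with
  | zero => rfl
  | succ n ih =>
    rw [pvIter, ih]
    rcases n with _ | _ | m
    · simp [pvG]
    · simp [pvG]
    · have h2 : m + 1 + 1 - 2 = m := by omega
      simp only [pvG, Nat.add_sub_cancel, h2]
      norm_num
      rw [show m + 1 + 1 + 1 - 2 = m + 1 by omega]

theorem pvSol_g (d : Nat) : ∀ (s goal : Int), goal - s = d → solution s goal = pvG d := by
  induction d using Nat.strong_induction_on with
  | _ d ih =>
    intro s goal h
    rcases d with _ | _ | _ | n
    · rw [solution]; simp [show s = goal by omega, pvG]
    · rw [solution]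
      rw [ih 0 (by omega) (s + 1) goal (by omega)]
      rw [show solution (s + 2) goal = 0 by rw [solution]; simp [show s + 2 > goal by omega]]
      rw [show solution (s + 3) goal = 0 by rw [solution]; simp [show s + 3 > goal by omega]]
      simp [show ¬ s > goal by omega, show ¬ s = goal by omega, pvG]
    · rw [solution]
      rw [ih 1 (by omega) (s + 1) goal (by omega)]
      rw [ih 0 (by omega) (s + 2) goal (by omega)]
      rw [show solution (s + 3) goal = 0 by rw [solution]; simp [show s + 3 > goal by omega]]
      simp [show ¬ s > goal by omega, show ¬ s = goal by omega, pvG]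
    · rw [solution]
      rw [ih (n + 2) (by omega) (s + 1) goal (by omega)]
      rw [ih (n + 1) (by omega) (s + 2) goal (by omega)]
      rw [ih n (by omega) (s + 3) goal (by omega)]
      simp [show ¬ s > goal by omega, show ¬ s = goal by omega, pvG]

-- ===== VERDICT (by name: the statement is the Claim_ definition above) =====
theorem solution_spec : Claim_equal_solution := by
  intro s goal _ _
  unfold Spec_solution solution_alt
  by_cases h : goal - s < 0
  · rw [solution]; simp [show s > goal by omega, h]
  · simp only [h, if_false]
    rw [pvFoldl_range, pvIter_eq, pvSol_g (goal - s).toNat s goal (by omega)]
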